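-- pv_equiv track=rewrite | github.com/ETHANOLS/cs125-travel-rec | src/ui/app.py | get_emoji
-- ===== SOURCE A (Python) =====
-- from typing import Any, Dict, List, Sequence
--
-- def get_emoji(interests: Sequence[str]) -> str:
--     if any(i in interests for i in ["hiking", "adventure"]):
--         return "⛰️"
--     if any(i in interests for i in ["spiritual", "culture"]):
--         return "⛩️"
--     if any(i in interests for i in ["food", "culinary"]):
--         return "🍜"
--     if any(i in interests for i in ["art", "photography"]):
--         return "🎨"
--     if "wildlife" in interests:
--         return "🦌"
--     if "festivals" in interests:
--         return "🎆"
--     if any(i in interests for i in ["relaxation", "wellness"]):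
--         return "♨️"
--     if any(i in interests for i in ["entertainment", "pop culture", "anime"]):
--         return "🎮"
--     if any(i in interests for i in ["shopping", "fashion"]):
--         return "🛍️"
--     if any(i in interests for i in ["history", "education"]):
--         return "🏯"
--     if "sports" in interests:
--         return "🏅"
--     if "beaches" in interests:
--         return "🏖️"
--     if any(i in interests for i in ["crane games", "video games", "trading cards"]):
--         return "🕹️"
--     if any(i in interests for i in ["nature", "scenery"]):
--         return "🌸"
--     if "night life" in interests:
--         return "🌙"
--     return "📍"
-- ===== SOURCE B (Python) =====
-- RANK = {
--     "hiking": 0, "adventure": 0,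
--     "spiritual": 1, "culture": 1,
--     "food": 2, "culinary": 2,
--     "art": 3, "photography": 3,
--     "wildlife": 4,
--     "festivals": 5,
--     "relaxation": 6, "wellness": 6,
--     "entertainment": 7, "pop culture": 7, "anime": 7,
--     "shopping": 8, "fashion": 8,
--     "history": 9, "education": 9,
--     "sports": 10,
--     "beaches": 11,
--     "crane games": 12, "video games": 12, "trading cards": 12,
--     "nature": 13, "scenery": 13,
--     "night life": 14,
-- }
--
-- EMOJIS = ["⛰️", "⛩️", "🍜", "🎨", "🦌", "🎆", "♨️", "🎮",
--           "🛍️", "🏯", "🏅", "🏖️", "🕹️", "🌸", "🌙"]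
--
--
-- def get_emoji(interests):
--     best = None
--     for s in interests:
--         r = RANK.get(s)
--         if r is not None and (best is None or r < best):
--             best = r
--     return "📍" if best is None else EMOJIS[best]
-- ===== Notes on version B (the rewrite author's own statement) =====
-- stated objective: faster
-- what changed: A scans the 15 priority groups in order, each time testing group keywords for membership in the input list; B makes one pass over the input against a precomputed keyword-to-rank dictionary, keeping the minimal rank, and indexes an emoji table at the end.
import Mathlib
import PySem

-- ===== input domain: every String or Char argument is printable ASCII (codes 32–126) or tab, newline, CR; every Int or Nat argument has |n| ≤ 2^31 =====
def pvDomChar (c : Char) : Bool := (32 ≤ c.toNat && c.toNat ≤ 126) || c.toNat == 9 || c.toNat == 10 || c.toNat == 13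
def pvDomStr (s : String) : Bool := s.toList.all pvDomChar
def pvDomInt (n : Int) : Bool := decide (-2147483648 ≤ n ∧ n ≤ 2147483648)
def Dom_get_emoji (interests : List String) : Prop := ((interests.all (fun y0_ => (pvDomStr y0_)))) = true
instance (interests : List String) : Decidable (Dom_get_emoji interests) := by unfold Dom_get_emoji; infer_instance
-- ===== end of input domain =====

-- B replaces A's sequential scan of the 15 priority groups by a single pass over
-- `interests` against a precomputed keyword→rank dictionary, keeping the minimal rank
-- (objective: faster — one O(1)-lookup pass instead of repeated membership scans of the input).

-- ===== PORT A =====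
def get_emoji (interests : List String) : String :=
  if interests.contains "hiking" || interests.contains "adventure" then "⛰️"
  else if interests.contains "spiritual" || interests.contains "culture" then "⛩️"
  else if interests.contains "food" || interests.contains "culinary" then "🍜"
  else if interests.contains "art" || interests.contains "photography" then "🎨"
  else if interests.contains "wildlife" then "🦌"
  else if interests.contains "festivals" then "🎆"
  else if interests.contains "relaxation" || interests.contains "wellness" then "♨️"
  else if interests.contains "entertainment" || interests.contains "pop culture" || interests.contains "anime" then "🎮"
  else if interests.contains "shopping" || interests.contains "fashion" then "🛍️"
  else if interests.contains "history" || interests.contains "education" then "🏯"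
  else if interests.contains "sports" then "🏅"
  else if interests.contains "beaches" then "🏖️"
  else if interests.contains "crane games" || interests.contains "video games" || interests.contains "trading cards" then "🕹️"
  else if interests.contains "nature" || interests.contains "scenery" then "🌸"
  else if interests.contains "night life" then "🌙"
  else "📍"

-- ===== PORT B =====
def pvRankPairs : List (String × Int) :=
  [("hiking", 0), ("adventure", 0), ("spiritual", 1), ("culture", 1), ("food", 2),
   ("culinary", 2), ("art", 3), ("photography", 3), ("wildlife", 4), ("festivals", 5),
   ("relaxation", 6), ("wellness", 6), ("entertainment", 7), ("pop culture", 7),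
   ("anime", 7), ("shopping", 8), ("fashion", 8), ("history", 9), ("education", 9),
   ("sports", 10), ("beaches", 11), ("crane games", 12), ("video games", 12),
   ("trading cards", 12), ("nature", 13), ("scenery", 13), ("night life", 14)]

def pvRank : PySem.Dict String Int := PySem.Dict.ofList pvRankPairs

def pvEmojis : List String :=
  ["⛰️", "⛩️", "🍜", "🎨", "🦌", "🎆", "♨️", "🎮", "🛍️", "🏯", "🏅", "🏖️", "🕹️", "🌸", "🌙"]

-- the loop body: r = RANK.get(s); if r is not None and (best is None or r < best): best = r
def pvStep (b : Option Int) (s : String) : Option Int :=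
  match PySem.Dict.get? pvRank s with
  | none => b
  | some r =>
    match b with
    | none => some r
    | some m => if r < m then some r else b

def get_emoji_alt (interests : List String) : String :=
  match interests.foldl pvStep none with
  | none => "📍"
  | some m => PySem.List.pyGetD pvEmojis m "📍"   -- EMOJIS[best]; best is always in 0..14

-- ===== PRECONDITION & SPEC =====
def Spec_get_emoji (interests : List String) (out : String) : Prop := out = get_emoji_alt interests
instance (interests : List String) (out : String) : Decidable (Spec_get_emoji interests out) := by unfold Spec_get_emoji; infer_instance

-- ===== CLAIM (what is proved, stated in full; the proofs are below) =====
def Claim_equal_get_emoji : Prop := ∀ (interests : List String), Dom_get_emoji interests → Spec_get_emoji interests (get_emoji interests)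

-- ===== LEMMAS AND PROOFS =====

-- The 15 priority groups of A, in order, with their emojis.
def pvTable : List (List String × String) :=
  [(["hiking", "adventure"], "⛰️"), (["spiritual", "culture"], "⛩️"),
   (["food", "culinary"], "🍜"), (["art", "photography"], "🎨"), (["wildlife"], "🦌"),
   (["festivals"], "🎆"), (["relaxation", "wellness"], "♨️"),
   (["entertainment", "pop culture", "anime"], "🎮"), (["shopping", "fashion"], "🛍️"),
   (["history", "education"], "🏯"), (["sports"], "🏅"), (["beaches"], "🏖️"),
   (["crane games", "video games", "trading cards"], "🕹️"), (["nature", "scenery"], "🌸"),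
   (["night life"], "🌙")]

def pvPick (xs : List String) : List (List String × String) → String
  | [] => "📍"
  | (g, e) :: rest => if g.any (fun k => xs.contains k) then e else pvPick xs rest

lemma get_emoji_eq_pick (xs : List String) : get_emoji xs = pvPick xs pvTable := by
  simp [get_emoji, pvPick, pvTable, or_assoc]

-- every (keyword, rank) pair really is what the dict answers
lemma pairs_get : ∀ p ∈ pvRankPairs, PySem.Dict.get? pvRank p.1 = some p.2 := by decide

-- the dict answers nothing else
lemma rank_mem (s : String) (r : Int) (h : PySem.Dict.get? pvRank s = some r) :
    (s, r) ∈ pvRankPairs := by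
  have hmem : (s, r) ∈ pvRank.items := PySem.Dict.mem_items_of_get?_eq_some _ h
  have hit : pvRank.items = pvRankPairs := by decide
  rwa [hit] at hmem

lemma rank_bounds : ∀ p ∈ pvRankPairs, 0 ≤ p.2 ∧ p.2 < 15 := by decide

lemma pairs_in_table : ∀ p ∈ pvRankPairs, p.1 ∈ (pvTable.getD p.2.toNat ([], "")).1 := by decide

lemma table_to_pairs : ∀ (i : Nat) (h : i < pvTable.length),
    ∀ k ∈ (pvTable[i]).1, (k, (i : Int)) ∈ pvRankPairs := by decide

lemma emojis_eq_map : pvEmojis = pvTable.map Prod.snd := by decide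

lemma foldl_none (xs : List String) : ∀ b, xs.foldl pvStep b = none ↔
    b = none ∧ xs.filterMap (fun s => PySem.Dict.get? pvRank s) = [] := by
  induction xs with
  | nil => intro b; simp
  | cons x xs ih =>
    intro b
    simp only [List.foldl_cons, List.filterMap_cons]
    cases hx : PySem.Dict.get? pvRank x with
    | none => simpa [pvStep, hx] using ih b
    | some r =>
      cases b with
      | none => simp [pvStep, hx, ih]
      | some m => simp only [pvStep, hx]; split_ifs <;> simp [ih]

lemma foldl_some_min (xs : List String) : ∀ b m, xs.foldl pvStep b = some m →
    (b = some m ∨ m ∈ xs.filterMap (fun s => PySem.Dict.get? pvRank s)) ∧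
    (∀ r, b = some r → m ≤ r) ∧
    (∀ r ∈ xs.filterMap (fun s => PySem.Dict.get? pvRank s), m ≤ r) := by
  induction xs with
  | nil => intro b m h; simp_all
  | cons x xs ih =>
    intro b m h
    simp only [List.foldl_cons] at h
    obtain ⟨hmem, hacc, htail⟩ := ih _ m h
    cases hx : PySem.Dict.get? pvRank x with
    | none =>
      simp only [pvStep, hx] at hmem hacc
      simp only [List.filterMap_cons, hx]
      exact ⟨hmem, hacc, htail⟩
    | some r =>
      simp only [List.filterMap_cons, hx]
      have key : m ≤ r ∧ (b = some m ∨ m = r ∨ m ∈ xs.filterMap (fun s => PySem.Dict.get? pvRank s)) ∧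
          (∀ r', b = some r' → m ≤ r') := by
        cases b with
        | none =>
          simp only [pvStep, hx] at hmem hacc
          refine ⟨hacc r rfl, ?_, by simp⟩
          rcases hmem with h' | h'
          · right; left; exact (Option.some.injEq _ _ ▸ h').symm
          · right; right; exact h'
        | some mb =>
          simp only [pvStep, hx] at hmem hacc
          by_cases hlt : r < mb
          · rw [if_pos hlt] at hmem hacc
            have hmr : m ≤ r := hacc r rfl
            refine ⟨hmr, ?_, ?_⟩
            · rcases hmem with h' | h'
              · right; left; exact (Option.some.injEq _ _ ▸ h').symm
              · right; right; exact h'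
            · intro r' hr'; rw [Option.some.injEq] at hr'; omega
          · rw [if_neg hlt] at hmem hacc
            have hmb : m ≤ mb := hacc mb rfl
            refine ⟨by omega, ?_, ?_⟩
            · rcases hmem with h' | h'
              · left; exact h'
              · right; right; exact h'
            · intro r' hr'; rw [Option.some.injEq] at hr'; omega
      obtain ⟨hmr, hmem', hacc'⟩ := key
      refine ⟨?_, hacc', ?_⟩
      · rcases hmem' with h' | h' | h'
        · left; exact h'
        · right; simp [h']
        · right; exact List.mem_cons_of_mem _ h'
      · intro r' hr'
        rcases List.mem_cons.mp hr' with rfl | hr'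
        · exact hmr
        · exact htail r' hr'

lemma pick_miss (xs : List String) : ∀ t, (∀ p ∈ t, ∀ k ∈ p.1, xs.contains k = false) →
    pvPick xs t = "📍" := by
  intro t
  induction t with
  | nil => intro _; rfl
  | cons p rest ih =>
    intro h
    obtain ⟨g, e⟩ := p
    have hg : g.any (fun k => xs.contains k) = false := by
      rw [List.any_eq_false]
      intro k hk
      simpa using h (g, e) List.mem_cons_self k hk
    simp only [pvPick, hg, Bool.false_eq_true, if_false]
    exact ih fun p hp => h p (List.mem_cons_of_mem _ hp)

lemma pick_hit (xs : List String) (g : List String) (e : String) (t2 : List (List String × String))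
    (k : String) (hk : k ∈ g) (hkx : k ∈ xs) :
    ∀ t1, (∀ p ∈ t1, ∀ k' ∈ p.1, xs.contains k' = false) →
    pvPick xs (t1 ++ (g, e) :: t2) = e := by
  intro t1
  induction t1 with
  | nil =>
    intro _
    have hg : g.any (fun k' => xs.contains k') = true :=
      List.any_eq_true.mpr ⟨k, hk, List.contains_iff_mem.mpr hkx⟩
    simp only [List.nil_append, pvPick, hg, if_true]
  | cons p rest ih =>
    intro h
    obtain ⟨g', e'⟩ := p
    have hg' : g'.any (fun k' => xs.contains k') = false := by
      rw [List.any_eq_false]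
      intro k' hk'
      simpa using h (g', e') List.mem_cons_self k' hk' 
    simp only [List.cons_append, pvPick, hg', Bool.false_eq_true, if_false]
    exact ih fun p hp => h p (List.mem_cons_of_mem _ hp)

-- ===== VERDICT (by name: the statement is the Claim_ definition above) =====
theorem get_emoji_spec : Claim_equal_get_emoji := by
  intro xs _
  unfold Spec_get_emoji
  rw [get_emoji_eq_pick]
  cases hb : xs.foldl pvStep none with
  | none =>
    have hfm := ((foldl_none xs none).mp hb).2
    rw [get_emoji_alt, hb]
    refine (pick_miss xs pvTable ?_).symm ▸ rfl
    intro p hp k hk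
    by_contra hc
    have hkx : k ∈ xs := List.contains_iff_mem.mp (by revert hc; cases xs.contains k <;> simp)
    obtain ⟨i, hi, rfl⟩ := List.mem_iff_getElem.mp hp
    have hpair := table_to_pairs i hi k hk
    have hget := pairs_get _ hpair
    have : (i : Int) ∈ xs.filterMap (fun s => PySem.Dict.get? pvRank s) :=
      List.mem_filterMap.mpr ⟨k, hkx, hget⟩
    rw [hfm] at this
    exact absurd this (List.not_mem_nil)
  | some m =>
    obtain ⟨hmem, _, hmin⟩ := foldl_some_min xs none m hb
    have hmem' : m ∈ xs.filterMap (fun s => PySem.Dict.get? pvRank s) := by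
      rcases hmem with h' | h'
      · exact absurd h' (by simp)
      · exact h'
    obtain ⟨s, hsx, hgs⟩ := List.mem_filterMap.mp hmem'
    have hsp : (s, m) ∈ pvRankPairs := rank_mem s m hgs
    have hbound := rank_bounds _ hsp
    have hn : m.toNat < pvTable.length := by simp [pvTable]; omega
    have hsg : s ∈ (pvTable[m.toNat]).1 := by
      have := pairs_in_table _ hsp
      rwa [List.getD_eq_getElem _ _ hn] at this
    have hsplit : pvTable = pvTable.take m.toNat ++ pvTable[m.toNat] :: pvTable.drop (m.toNat + 1) := by
      conv_lhs => rw [← List.take_append_drop m.toNat pvTable, List.drop_eq_getElem_cons hn]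
    have hmiss : ∀ p ∈ pvTable.take m.toNat, ∀ k ∈ p.1, xs.contains k = false := by
      intro p hp k hk
      rw [List.mem_take_iff_getElem] at hp
      obtain ⟨i, hi, rfl⟩ := hp
      have hi' : i < pvTable.length := by omega
      by_contra hc
      have hkx : k ∈ xs := List.contains_iff_mem.mp (by revert hc; cases xs.contains k <;> simp)
      have hpair := table_to_pairs i hi' k hk
      have hget := pairs_get _ hpair
      have hle : m ≤ (i : Int) := hmin _ (List.mem_filterMap.mpr ⟨k, hkx, hget⟩)
      omega
    rw [hsplit, ← Prod.mk.eta (p := pvTable[m.toNat]),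
      pick_hit xs (pvTable[m.toNat]).1 (pvTable[m.toNat]).2 _ s hsg hsx _ hmiss]
    rw [get_emoji_alt, hb]
    show pvTable[m.toNat].2 = PySem.List.pyGetD pvEmojis m "📍"
    have hlen : m < ((pvEmojis.length : Nat) : Int) := by simp [pvEmojis]; omega
    have e1 : PySem.List.pyGetD pvEmojis m "📍" = pvEmojis[m.toNat]'(by simp [pvEmojis]; omega) :=
      PySem.List.pyGetD_eq_getElem pvEmojis "📍" (by omega) hlen
    have h2 : pvEmojis[m.toNat]? = some (pvTable[m.toNat].2) := by
      rw [emojis_eq_map, List.getElem?_map, List.getElem?_eq_getElem hn]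
      rfl
    rw [e1]
    rw [List.getElem?_eq_getElem (by simp [pvEmojis]; omega)] at h2
    exact (Option.some.inj h2).symm
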